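-- pv_equiv track=rewrite | github.com/F43M/DevAI-R1 | Scraper_Wiki/utils/quality.py | balance_quality
-- ===== SOURCE A (Python) =====
-- from typing import Dict, List, Tuple
--
-- def balance_quality(records: List[Dict]) -> List[Dict]:
--     """Balance dataset records by quality level.
--
--     The function keeps the same number of records for each quality
--     class by truncating larger groups.
--     """
--     groups: Dict[str, List[Dict]] = {"high": [], "medium": [], "low": []}
--     for rec in records:
--         groups.setdefault(rec.get("quality", "medium"), []).append(rec)
--
--     counts = [len(v) for v in groups.values() if v]
--     if not counts:
--         return records
--     min_count = min(counts)
--     balanced: List[Dict] = []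
--     for q in ["high", "medium", "low"]:
--         balanced.extend(groups.get(q, [])[:min_count])
--     return balanced
-- ===== SOURCE B (Python) =====
-- def balance_quality(records):
--     """Balance dataset records by quality level (count-first re-implementation).
--
--     Counts qualities in one pass (no grouped lists kept), then emits each
--     canonical group by re-scanning records, truncated to the minimum count.
--     """
--     counts = {}
--     for rec in records:
--         q = rec.get("quality", "medium")
--         counts[q] = counts.get(q, 0) + 1
--     if not counts:
--         return records
--     m = min(counts.values())
--     out = []
--     for q in ("high", "medium", "low"):
--         out += [r for r in records if r.get("quality", "medium") == q][:m]
--     return out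
-- ===== Notes on version B (the rewrite author's own statement) =====
-- stated objective: alternative
-- what changed: B keeps no grouped lists: it builds only a quality->count map in one pass, takes the minimum count, and then emits each canonical group by filtering the original records directly, instead of A's dict of accumulated per-group lists sliced afterwards.
import Mathlib
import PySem

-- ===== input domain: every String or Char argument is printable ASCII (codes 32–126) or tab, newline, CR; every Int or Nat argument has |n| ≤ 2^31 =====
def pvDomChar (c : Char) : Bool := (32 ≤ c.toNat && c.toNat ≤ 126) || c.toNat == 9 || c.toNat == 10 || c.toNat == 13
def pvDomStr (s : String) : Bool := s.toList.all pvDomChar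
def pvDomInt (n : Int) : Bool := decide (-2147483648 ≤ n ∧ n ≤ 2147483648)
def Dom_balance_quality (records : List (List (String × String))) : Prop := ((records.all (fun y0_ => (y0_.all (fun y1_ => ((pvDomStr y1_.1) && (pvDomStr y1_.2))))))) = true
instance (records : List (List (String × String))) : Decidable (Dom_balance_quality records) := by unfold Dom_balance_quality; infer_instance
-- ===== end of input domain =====

-- ===== PORT A =====
-- B keeps no grouped lists, only quality counts, and re-filters records per canonical
-- quality; same return value as A's grouped-dict-and-slice version, proved equal below.
def balance_quality (records : List (List (String × String))) : List (List (String × String)) :=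
  let groups : PySem.Dict String (List (List (String × String))) :=
    records.foldl
      (fun d r => d.modify ((PySem.Dict.mk r).getD "quality" "medium") [] (fun v => v ++ [r]))
      (((PySem.Dict.empty.insert "high" []).insert "medium" []).insert "low" [])
  let counts : List Int := (groups.values.filter (fun v => !v.isEmpty)).map (fun v => (v.length : Int))
  match PySem.List.min? counts (fun x => x) with
  | none => records
  | some min_count =>
    ["high", "medium", "low"].foldl
      (fun balanced q => balanced ++ PySem.List.slice (groups.getD q []) none (some min_count)) []

-- ===== PORT B =====
def balance_quality_alt (records : List (List (String × String))) : List (List (String × String)) :=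
  let counts : PySem.Dict String Int :=
    records.foldl
      (fun d r => d.modify ((PySem.Dict.mk r).getD "quality" "medium") 0 (fun c => c + 1))
      PySem.Dict.empty
  match PySem.List.min? counts.values (fun x => x) with
  | none => records
  | some m =>
    ["high", "medium", "low"].foldl
      (fun out q => out ++ PySem.List.slice
        (records.filter (fun r => (PySem.Dict.mk r).getD "quality" "medium" == q)) none (some m)) []

-- ===== PRECONDITION & SPEC =====
def Spec_balance_quality (records : List (List (String × String))) (out : List (List (String × String))) : Prop := out = balance_quality_alt records
instance (records : List (List (String × String))) (out : List (List (String × String))) : Decidable (Spec_balance_quality records out) := by unfold Spec_balance_quality; infer_instance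

-- ===== CLAIM (what is proved, stated in full; the proofs are below) =====
def Claim_equal_balance_quality : Prop := ∀ (records : List (List (String × String))), Dom_balance_quality records → Spec_balance_quality records (balance_quality records)

-- ===== LEMMAS AND PROOFS =====
-- the quality of one record, as both ports read it
def pvQual (r : List (String × String)) : String := (PySem.Dict.mk r).getD "quality" "medium"

-- the per-quality group as a filter of the original list
def pvGrp (records : List (List (String × String))) (q : String) : List (List (String × String)) :=
  records.filter (fun r => pvQual r == q)

def pvInit : PySem.Dict String (List (List (String × String))) :=
  ((PySem.Dict.empty.insert "high" []).insert "medium" []).insert "low" []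

lemma pvInit_getD (c : String) : pvInit.getD c [] = [] := by
  rw [show pvInit = PySem.Dict.mk [("high", []), ("medium", []), ("low", [])] from rfl]
  simp only [PySem.Dict.getD, PySem.Dict.get?_mk_cons]
  cases "high" == c <;> cases "medium" == c <;> cases "low" == c <;> rfl

-- A's grouping dict looked up at any key is the filtered sublist
lemma pvGroups_getD (records : List (List (String × String))) (c : String) :
    (records.foldl (fun d r => d.modify (pvQual r) [] (fun v => v ++ [r])) pvInit).getD c []
      = pvGrp records c := by
  have h : records.foldl (fun d r => d.modify (pvQual r) [] (fun v => v ++ [r])) pvInit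
      = (records.map (fun r => (pvQual r, r))).foldl
          (fun d p => d.modify p.1 [] (fun v => v ++ [p.2])) pvInit := by
    rw [List.foldl_map]
  rw [h, PySem.Dict.getD_foldl_modify_append, pvInit_getD, List.filter_map]
  simp [pvGrp, Function.comp_def]

-- a quality occurs among the record qualities iff its group filter is nonempty
lemma pvMemQ (records : List (List (String × String))) (k : String) :
    k ∈ records.map pvQual ↔ pvGrp records k ≠ [] := by
  rw [List.mem_map]
  constructor
  · rintro ⟨r, hr, rfl⟩
    exact List.ne_nil_of_mem (List.mem_filter.mpr ⟨hr, by simp⟩)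
  · intro h
    rcases List.exists_mem_of_ne_nil _ h with ⟨r, hr⟩
    rcases List.mem_filter.mp hr with ⟨h1, h2⟩
    exact ⟨r, h1, by simpa using h2⟩

-- Python min over a permuted Int list is the same value
lemma pvMin?_perm {l1 l2 : List Int} (h : l1.Perm l2) :
    PySem.List.min? l1 (fun x => x) = PySem.List.min? l2 (fun x => x) := by
  rcases h1 : PySem.List.min? l1 (fun x => x) with _ | m1 <;>
    rcases h2 : PySem.List.min? l2 (fun x => x) with _ | m2
  · rfl
  · exfalso
    rw [PySem.List.min?_eq_none_iff] at h1
    subst h1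
    have h2nil : l2 = [] := List.Perm.eq_nil h.symm
    subst h2nil
    simpa using PySem.List.min?_mem h2
  · exfalso
    rw [PySem.List.min?_eq_none_iff] at h2
    subst h2
    have h1nil : l1 = [] := List.Perm.eq_nil h
    subst h1nil
    simpa using PySem.List.min?_mem h1
  · have hm1 := PySem.List.min?_mem h1
    have hm2 := PySem.List.min?_mem h2
    have le1 := PySem.List.min?_isMin h1 m2 (h.mem_iff.mpr hm2)
    have le2 := PySem.List.min?_isMin h2 m1 (h.mem_iff.mp hm1)
    rw [le_antisymm le1 le2]

-- A's nonempty group sizes are a permutation of B's counter values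
lemma pvCounts_perm (records : List (List (String × String))) :
    (((records.foldl (fun d r => d.modify (pvQual r) [] (fun v => v ++ [r])) pvInit).values.filter
        (fun v => !v.isEmpty)).map (fun v => (v.length : Int))).Perm
      ((records.foldl (fun d r => d.modify (pvQual r) 0 (fun c => c + 1))
        (PySem.Dict.empty : PySem.Dict String Int)).values) := by
  set Q : List String := records.map pvQual with hQ
  have hB : records.foldl (fun d r => d.modify (pvQual r) 0 (fun c => c + 1))
      (PySem.Dict.empty : PySem.Dict String Int) = PySem.Dict.counter Q := by
    rw [PySem.Dict.counter_eq_foldl, hQ, List.foldl_map]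
  set G := records.foldl (fun d r => d.modify (pvQual r) [] (fun v => v ++ [r])) pvInit with hG
  have hGkeysnd : G.keys.Nodup := by
    rw [hG]
    exact PySem.Dict.nodup_keys_foldl_modify_key records pvQual [] (fun _ r v => v ++ [r]) pvInit
      (by decide)
  have hGkeys : G.keys = PySem.Set.update pvInit.keys Q := by
    rw [hG, PySem.Dict.keys_foldl_modify_key records pvQual [] (fun _ r v => v ++ [r]) pvInit, hQ]
  have hgetD : ∀ c, G.getD c [] = pvGrp records c := fun c => by
    rw [hG]; exact pvGroups_getD records c
  rw [hB, PySem.Dict.values_eq_map_keys _ (PySem.Dict.nodup_keys_counter Q) 0,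
    PySem.Dict.values_eq_map_keys G hGkeysnd [], List.filter_map, List.map_map,
    PySem.Dict.keys_counter]
  have hmapeq : (G.keys.filter ((fun v => !v.isEmpty) ∘ fun k => G.getD k [])).map
        ((fun v => (v.length : Int)) ∘ fun k => G.getD k []) =
      (G.keys.filter ((fun v => !v.isEmpty) ∘ fun k => G.getD k [])).map
        (fun k => ((pvGrp records k).length : Int)) :=
    List.map_congr_left (fun k _ => by simp [Function.comp, hgetD])
  have hmapeq2 : (PySem.Set.ofList Q).map (fun k => (PySem.Dict.counter Q).getD k 0) =
      (PySem.Set.ofList Q).map (fun k => ((pvGrp records k).length : Int)) :=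
    List.map_congr_left (fun k _ => by
      rw [PySem.Dict.getD_counter, hQ]
      congr 1
      rw [List.count_eq_countP, List.countP_map, List.countP_eq_length_filter]
      rfl)
  rw [hmapeq, hmapeq2]
  refine List.Perm.map _ ?_
  rw [List.perm_ext_iff_of_nodup (hGkeysnd.filter _) (PySem.Set.nodup_ofList Q)]
  intro k
  rw [List.mem_filter, PySem.Set.mem_ofList, hGkeys, PySem.Set.mem_update]
  have hne := pvMemQ records k
  constructor
  · rintro ⟨_, hp⟩
    refine hQ ▸ hne.mpr ?_
    simpa [Function.comp, hgetD k, List.isEmpty_iff] using hp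
  · intro hk
    refine ⟨Or.inr hk, ?_⟩
    have hnn : pvGrp records k ≠ [] := hne.mp (hQ ▸ hk)
    simp [Function.comp, hgetD k, hnn]

-- ===== VERDICT (by name: the statement is the Claim_ definition above) =====
theorem balance_quality_spec : Claim_equal_balance_quality := by
  intro records _
  unfold Spec_balance_quality balance_quality balance_quality_alt
  have hmin := pvMin?_perm (pvCounts_perm records)
  have hg : ∀ c, (records.foldl
      (fun d r => d.modify ((PySem.Dict.mk r).getD "quality" "medium") [] (fun v => v ++ [r]))
      (((PySem.Dict.empty.insert "high" []).insert "medium" []).insert "low" [])).getD c []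
        = records.filter (fun r => (PySem.Dict.mk r).getD "quality" "medium" == c) := by
    intro c
    have := pvGroups_getD records c
    simpa [pvQual, pvInit, pvGrp] using this
  simp only [pvQual, pvInit] at hmin
  dsimp only
  rw [hmin]
  rcases hsc : PySem.List.min? ((records.foldl
      (fun d r => d.modify ((PySem.Dict.mk r).getD "quality" "medium") 0 (fun c => c + 1))
      (PySem.Dict.empty : PySem.Dict String Int)).values) (fun x => x) with _ | m
  · rw [hsc]
  · rw [hsc]
    simp only [List.foldl]
    rw [hg "high", hg "medium", hg "low"]
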